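-- pv_equiv track=rewrite | github.com/ParthTagalpallewar/Ds-And-Algo-Python | String/PractiseProblem/maxCombinations.py | search
-- ===== SOURCE A (Python) =====
-- def search(pat, txt):
-- 	    #finding possible cases of pat
--
-- 	    possibleCobnination = []
--
-- 	    combination = ""
-- 	    for i in range(0, len(pat)):
-- 	        combination += pat[i-1]
--
-- 	        for j in range(0, len(pat)):
--
-- 	            if(i != j):
-- 	                combination += pat[-1]
--
-- 	        possibleCobnination.append(combination)
--
-- 	    return possibleCobnination
-- ===== SOURCE B (Python) =====
-- def search(pat, txt):
--     n = len(pat)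
--     full = "".join(pat[i - 1] + pat[-1] * (n - 1) for i in range(n))
--     return [full[:(i + 1) * n] for i in range(n)]
-- ===== Notes on version B (the rewrite author's own statement) =====
-- stated objective: simpler
-- what changed: Instead of mutating a running string with a nested j-loop that appends pat[-1] once per j != i and snapshotting after each outer step, B joins n fixed-size chunks pat[i-1] + pat[-1]*(n-1) into one full string once and returns its prefixes of length (i+1)*n by slicing.
import Mathlib
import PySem

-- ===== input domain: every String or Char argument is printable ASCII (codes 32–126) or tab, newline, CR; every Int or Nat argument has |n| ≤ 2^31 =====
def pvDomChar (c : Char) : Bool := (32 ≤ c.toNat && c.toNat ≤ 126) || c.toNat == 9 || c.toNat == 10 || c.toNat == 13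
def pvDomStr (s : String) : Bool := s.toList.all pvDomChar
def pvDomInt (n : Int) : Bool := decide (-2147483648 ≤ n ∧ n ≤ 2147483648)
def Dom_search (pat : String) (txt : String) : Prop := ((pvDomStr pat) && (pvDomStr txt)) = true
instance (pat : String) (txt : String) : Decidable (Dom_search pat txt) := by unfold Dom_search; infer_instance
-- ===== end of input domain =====

-- B builds the whole string once from fixed-size chunks and returns its prefixes by slicing,
-- instead of A's running accumulator with a nested j-loop; equivalence of return values proved below.

-- ===== PORT A =====
def search (pat : String) (txt : String) : List String :=
  let cs := pat.toList
  let n : Int := cs.length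
  ((PySem.List.pyRange 0 n 1).foldl
    (fun (st : List Char × List String) i =>
      let c1 := st.1 ++ [PySem.List.pyGetD cs (i - 1) ' ']
      let c2 := (PySem.List.pyRange 0 n 1).foldl
        (fun c j => if i ≠ j then c ++ [PySem.List.pyGetD cs (-1) ' '] else c) c1
      (c2, st.2 ++ [String.mk c2]))
    ([], [])).2

-- ===== PORT B =====
def search_alt (pat : String) (txt : String) : List String :=
  let cs := pat.toList
  let n : Int := cs.length
  let full := (PySem.List.pyRange 0 n 1).foldl
    (fun acc i =>
      acc ++ (PySem.List.pyGetD cs (i - 1) ' '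
                :: List.replicate (n - 1).toNat (PySem.List.pyGetD cs (-1) ' '))) []
  (PySem.List.pyRange 0 n 1).map
    (fun i => String.mk (PySem.List.slice full none (some ((i + 1) * n))))

-- ===== PRECONDITION & SPEC =====
def Spec_search (pat : String) (txt : String) (out : List String) : Prop := out = search_alt pat txt
instance (pat : String) (txt : String) (out : List String) : Decidable (Spec_search pat txt out) := by unfold Spec_search; infer_instance

-- ===== CLAIM (what is proved, stated in full; the proofs are below) =====
def Claim_equal_search : Prop := ∀ (pat : String) (txt : String), Dom_search pat txt → Spec_search pat txt (search pat txt)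

-- ===== LEMMAS AND PROOFS =====

-- the chunk appended by one outer iteration of either program, for pattern characters cs
def pvChunk (cs : List Char) (i : Int) : List Char :=
  PySem.List.pyGetD cs (i - 1) ' '
    :: List.replicate ((cs.length : Int) - 1).toNat (PySem.List.pyGetD cs (-1) ' ')

-- fold that conditionally appends a constant equals append of a counted replicate
lemma pv_foldl_if_replicate (i : Int) (x : Char) (l : List Int) (c1 : List Char) :
    l.foldl (fun c j => if i ≠ j then c ++ [x] else c) c1
    = c1 ++ List.replicate (l.countP (fun j => decide (i ≠ j))) x := by
  induction l generalizing c1 with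
  | nil => simp
  | cons a t ih =>
    rw [List.foldl_cons, ih, List.countP_cons]
    by_cases h : i = a
    · simp [h]
    · rw [if_pos h]
      simp only [List.append_assoc, List.singleton_append]
      rw [← List.replicate_succ]
      simp [h]

-- range 0..n contains exactly n-1 indices different from i
lemma pv_count (n : Nat) (i : Int) (h1 : 0 ≤ i) (h2 : i < n) :
    (List.range n).countP (fun (k : Nat) => decide (i ≠ ((0:Int) + (k:Int)))) = n - 1 := by
  induction n with
  | zero => simp at h2; omega
  | succ m ih =>
    rw [List.range_succ, List.countP_append]
    by_cases h : i = m
    · have hc : (List.range m).countP (fun (k : Nat) => decide (i ≠ ((0:Int) + (k:Int)))) = m := by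
        rw [List.countP_eq_length.mpr]
        · exact List.length_range
        · intro k hk
          simp at hk ⊢
          omega
      rw [hc, h]
      simp
    · have hlt : i < m := by push_cast at h2; omega
      rw [ih hlt]
      have hone : (List.countP (fun (k : Nat) => decide (i ≠ ((0:Int) + (k:Int)))) [m]) = 1 := by
        simp; omega
      rw [hone]
      omega

-- A's inner j-loop appends the last character once per j ≠ i
lemma pv_inner (cs : List Char) (i : Int) (hi : 0 ≤ i) (hin : i < (cs.length : Int))
    (c1 : List Char) :
    (PySem.List.pyRange 0 (cs.length : Int) 1).foldl
      (fun c j => if i ≠ j then c ++ [PySem.List.pyGetD cs (-1) ' '] else c) c1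
    = c1 ++ List.replicate ((cs.length : Int) - 1).toNat (PySem.List.pyGetD cs (-1) ' ') := by
  rw [pv_foldl_if_replicate, PySem.List.pyRange_one, List.countP_map]
  have hn : (((cs.length : Int) - 0).toNat) = cs.length := by omega
  rw [hn]
  have hc : ((fun j => decide (i ≠ j)) ∘ fun k : Nat => (0:Int) + (k:Int))
      = (fun (k : Nat) => decide (i ≠ ((0:Int) + (k:Int)))) := rfl
  rw [hc, pv_count cs.length i hi (by exact_mod_cast hin)]
  rw [show ((cs.length : Int) - 1).toNat = cs.length - 1 by omega]

-- closed form of A's outer loop: the snapshots are the growing chunk prefixes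
lemma pv_outer (cs : List Char) (l : List Int)
    (hl : ∀ i ∈ l, 0 ≤ i ∧ i < (cs.length : Int)) (c0 : List Char) (out0 : List String) :
    (l.foldl
      (fun (st : List Char × List String) i =>
        let c1 := st.1 ++ [PySem.List.pyGetD cs (i - 1) ' ']
        let c2 := (PySem.List.pyRange 0 (cs.length : Int) 1).foldl
          (fun c j => if i ≠ j then c ++ [PySem.List.pyGetD cs (-1) ' '] else c) c1
        (c2, st.2 ++ [String.mk c2]))
      (c0, out0)).2
    = out0 ++ (List.range l.length).map
        (fun k => String.mk (c0 ++ ((l.take (k + 1)).map (pvChunk cs)).flatten)) := by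
  induction l generalizing c0 out0 with
  | nil => simp
  | cons a t ih =>
    rw [List.foldl_cons]
    simp only
    rw [pv_inner cs a (hl a (by simp)).1 (hl a (by simp)).2]
    have hstep : (c0 ++ [PySem.List.pyGetD cs (a - 1) ' '])
        ++ List.replicate ((cs.length : Int) - 1).toNat (PySem.List.pyGetD cs (-1) ' ')
        = c0 ++ pvChunk cs a := by
      simp [pvChunk]
    rw [hstep, ih (fun i hi => hl i (by simp [hi]))]
    rw [List.length_cons, List.range_succ_eq_map]
    simp [List.range_succ_eq_map, List.map_map, Function.comp_def, List.take_succ_cons,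
      List.append_assoc]

-- take of k n-sized blocks out of a flatten of n-sized blocks
lemma pv_take_flatten (m : Nat) : ∀ (L : List (List Char)) (k : Nat),
    (∀ c ∈ L, c.length = m) → L.flatten.take (k * m) = (L.take k).flatten := by
  intro L
  induction L with
  | nil => intro k _; simp
  | cons c L' ih =>
    intro k hlen
    cases k with
    | zero => simp
    | succ k' =>
      have hc : c.length = m := hlen c (by simp)
      have hm : (k' + 1) * m = c.length + k' * m := by rw [hc]; ring
      rw [List.flatten_cons, hm, List.take_append]
      simp [ih k' (fun d hd => hlen d (by simp [hd])), List.take_succ_cons]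

theorem pv_main (pat txt : String) : search pat txt = search_alt pat txt := by
  unfold search search_alt
  simp only
  set cs := pat.toList with hcs
  cases hN : cs.length with
  | zero =>
    have : cs = [] := List.eq_nil_of_length_eq_zero hN
    simp [this]
  | succ N' =>
    set N := N' + 1 with hNdef
    rw [← hN]
    have hNpos : 1 ≤ cs.length := by omega
    -- A side
    rw [pv_outer cs _ (fun i hi => by
      rw [PySem.List.mem_pyRange_one] at hi; exact hi) [] []]
    -- B side: the built string is the flatten of all chunks
    rw [PySem.List.foldl_append_eq_flatMap]
    simp only [List.nil_append, List.flatMap_def]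
    rw [show (fun i => PySem.List.pyGetD cs (i - 1) ' '
        :: List.replicate ((cs.length : Int) - 1).toNat (PySem.List.pyGetD cs (-1) ' '))
        = pvChunk cs from rfl]
    have hlen : (PySem.List.pyRange 0 (cs.length : Int) 1).length = cs.length := by
      rw [PySem.List.length_pyRange_one]; omega
    rw [hlen]
    apply List.ext_getElem
    · simp [hlen]
    · intro k hk1 hk2
      simp only [List.getElem_map] at hk1 ⊢
      have hk : k < cs.length := by simpa using hk1
      have hgr : (PySem.List.pyRange 0 (cs.length : Int) 1)[k]'(by rw [hlen]; exact hk)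
          = (0 : Int) + k := PySem.List.getElem_pyRange_one ..
      rw [List.getElem_range]
      rw [hgr]
      congr 1
      -- goal: take-prefix of the full flatten equals flatten of taken chunks
      have hb : (0 : Int) ≤ ((0:Int) + k + 1) * (cs.length : Int) := by positivity
      rw [PySem.List.slice_to _ hb]
      have htn : (((0:Int) + k + 1) * (cs.length : Int)).toNat = (k + 1) * cs.length := by
        rw [show ((0:Int) + ↑k + 1) = ((k + 1 : Nat) : Int) by push_cast; ring, ← Nat.cast_mul,
          Int.toNat_natCast]
      rw [htn]
      rw [pv_take_flatten cs.length _ (k+1) (fun c hc => by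
        rcases List.mem_map.mp hc with ⟨i, _, rfl⟩
        show (pvChunk cs i).length = cs.length
        simp only [pvChunk, List.length_cons, List.length_replicate]
        omega)]
      rw [← List.map_take]

-- ===== VERDICT (by name: the statement is the Claim_ definition above) =====
theorem search_spec : Claim_equal_search := by
  intro pat txt _
  exact pv_main pat txt
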